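-- pv_equiv track=rewrite | github.com/vinayakdasgupta/anvay | app.py | extract_observational_lines
-- ===== SOURCE A (Python) =====
-- def extract_observational_lines(full_log):
--     lines = full_log.splitlines()
--     parsed = {
--         "token_filtering": [],
--         "config": [],
--         "progress": [],
--         "convergence": [],
--         "perplexity": [],
--         "final": []
--     }
--
--     for line in lines:
--         if "built Dictionary<" in line or "discarding" in line or "keeping" in line or "resulting dictionary" in line:
--             parsed["token_filtering"].append(line)
--         elif "using symmetric" in line or "running online LDA training" in line or "training LDA model" in line:
--             parsed["config"].append(line)
--         elif line.startswith("PROGRESS:"):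
--             parsed["progress"].append(line)
--         elif "documents converged" in line:
--             parsed["convergence"].append(line)
--         elif "perplexity estimate" in line:
--             parsed["perplexity"].append(line)
--         elif "LdaMulticore lifecycle event" in line:
--             parsed["final"].append(line)
--
--     return parsed
-- ===== SOURCE B (Python) =====
-- def extract_observational_lines(full_log):
--     rules = [
--         ("token_filtering", lambda l: "built Dictionary<" in l or "discarding" in l
--                                       or "keeping" in l or "resulting dictionary" in l),
--         ("config", lambda l: "using symmetric" in l or "running online LDA training" in l
--                              or "training LDA model" in l),
--         ("progress", lambda l: l.startswith("PROGRESS:")),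
--         ("convergence", lambda l: "documents converged" in l),
--         ("perplexity", lambda l: "perplexity estimate" in l),
--         ("final", lambda l: "LdaMulticore lifecycle event" in l),
--     ]
--     # Category-major sieve: one filtering pass per category; each pass keeps its
--     # matches and removes them from the pool, so earlier categories take priority.
--     parsed = {}
--     pool = full_log.splitlines()
--     for name, pred in rules:
--         parsed[name] = [l for l in pool if pred(l)]
--         pool = [l for l in pool if not pred(l)]
--     return parsed
-- ===== Notes on version B (the rewrite author's own statement) =====
-- stated objective: alternative
-- what changed: Replaces the line-major if-elif chain (one pass over the lines, branching per line) with a category-major sieve: six staged filtering passes, each extracting one category's matches from a shrinking pool and removing them, so priority comes from pass order instead of branch order.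
import Mathlib
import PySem

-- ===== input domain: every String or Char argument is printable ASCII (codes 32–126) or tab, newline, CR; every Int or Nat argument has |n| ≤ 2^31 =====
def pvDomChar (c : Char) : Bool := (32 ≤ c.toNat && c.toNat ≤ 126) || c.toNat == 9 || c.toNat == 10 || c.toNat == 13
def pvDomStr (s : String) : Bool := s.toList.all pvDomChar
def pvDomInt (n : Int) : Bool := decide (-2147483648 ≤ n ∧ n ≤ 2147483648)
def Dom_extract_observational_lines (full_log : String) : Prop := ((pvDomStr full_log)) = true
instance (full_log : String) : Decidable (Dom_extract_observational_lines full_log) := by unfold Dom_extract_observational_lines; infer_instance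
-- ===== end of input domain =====

-- B replaces A's line-major if-elif chain by a category-major sieve: six staged
-- filtering passes over a shrinking pool (alternative decomposition; same cost).

-- ===== PORT A =====
def eolStepA (d : PySem.Dict String (List String)) (line : String) : PySem.Dict String (List String) :=
  if PySem.Str.isIn "built Dictionary<" line || PySem.Str.isIn "discarding" line
      || PySem.Str.isIn "keeping" line || PySem.Str.isIn "resulting dictionary" line then
    d.modify "token_filtering" [] (· ++ [line])
  else if PySem.Str.isIn "using symmetric" line || PySem.Str.isIn "running online LDA training" line
      || PySem.Str.isIn "training LDA model" line then
    d.modify "config" [] (· ++ [line])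
  else if PySem.Str.startswith line "PROGRESS:" then
    d.modify "progress" [] (· ++ [line])
  else if PySem.Str.isIn "documents converged" line then
    d.modify "convergence" [] (· ++ [line])
  else if PySem.Str.isIn "perplexity estimate" line then
    d.modify "perplexity" [] (· ++ [line])
  else if PySem.Str.isIn "LdaMulticore lifecycle event" line then
    d.modify "final" [] (· ++ [line])
  else d

def extract_observational_lines (full_log : String) : List (String × List String) :=
  ((PySem.Str.splitlines full_log).foldl eolStepA
    (PySem.Dict.ofList [("token_filtering", []), ("config", []), ("progress", []),
                        ("convergence", []), ("perplexity", []), ("final", [])])).items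

-- ===== PORT B =====
def eolRules : List (String × (String → Bool)) :=
  [("token_filtering", fun l => PySem.Str.isIn "built Dictionary<" l || PySem.Str.isIn "discarding" l
      || PySem.Str.isIn "keeping" l || PySem.Str.isIn "resulting dictionary" l),
   ("config", fun l => PySem.Str.isIn "using symmetric" l || PySem.Str.isIn "running online LDA training" l
      || PySem.Str.isIn "training LDA model" l),
   ("progress", fun l => PySem.Str.startswith l "PROGRESS:"),
   ("convergence", fun l => PySem.Str.isIn "documents converged" l),
   ("perplexity", fun l => PySem.Str.isIn "perplexity estimate" l),
   ("final", fun l => PySem.Str.isIn "LdaMulticore lifecycle event" l)]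

-- one sieve pass per rule: keep the matches under the rule's name, drop them from the pool
def extract_observational_lines_alt (full_log : String) : List (String × List String) :=
  (eolRules.foldl
    (fun (st : PySem.Dict String (List String) × List String) r =>
      (st.1.insert r.1 (st.2.filter r.2), st.2.filter (fun l => !(r.2 l))))
    (PySem.Dict.empty, PySem.Str.splitlines full_log)).1.items

-- ===== PRECONDITION & SPEC =====
def Spec_extract_observational_lines (full_log : String) (out : List (String × List String)) : Prop := out = extract_observational_lines_alt full_log
instance (full_log : String) (out : List (String × List String)) : Decidable (Spec_extract_observational_lines full_log out) := by unfold Spec_extract_observational_lines; infer_instance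

-- ===== CLAIM (what is proved, stated in full; the proofs are below) =====
def Claim_equal_extract_observational_lines : Prop := ∀ (full_log : String), Dom_extract_observational_lines full_log → Spec_extract_observational_lines full_log (extract_observational_lines full_log)

-- ===== LEMMAS AND PROOFS =====
-- the six tests, named for the proofs only
def eolP1 (l : String) : Bool := PySem.Str.isIn "built Dictionary<" l || PySem.Str.isIn "discarding" l
  || PySem.Str.isIn "keeping" l || PySem.Str.isIn "resulting dictionary" l
def eolP2 (l : String) : Bool := PySem.Str.isIn "using symmetric" l || PySem.Str.isIn "running online LDA training" l
  || PySem.Str.isIn "training LDA model" l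
def eolP3 (l : String) : Bool := PySem.Str.startswith l "PROGRESS:"
def eolP4 (l : String) : Bool := PySem.Str.isIn "documents converged" l
def eolP5 (l : String) : Bool := PySem.Str.isIn "perplexity estimate" l
def eolP6 (l : String) : Bool := PySem.Str.isIn "LdaMulticore lifecycle event" l

-- closed form of A's loop over any line list, from any accumulator contents
theorem eolA_closed (ls : List String) (a1 a2 a3 a4 a5 a6 : List String) :
    ls.foldl eolStepA (PySem.Dict.mk [("token_filtering", a1), ("config", a2), ("progress", a3),
        ("convergence", a4), ("perplexity", a5), ("final", a6)])
    = PySem.Dict.mk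
        [("token_filtering", a1 ++ ls.filter eolP1),
         ("config", a2 ++ ls.filter (fun l => eolP2 l && !eolP1 l)),
         ("progress", a3 ++ ls.filter (fun l => eolP3 l && (!eolP2 l && !eolP1 l))),
         ("convergence", a4 ++ ls.filter (fun l => eolP4 l && (!eolP3 l && (!eolP2 l && !eolP1 l)))),
         ("perplexity", a5 ++ ls.filter (fun l => eolP5 l && (!eolP4 l && (!eolP3 l && (!eolP2 l && !eolP1 l))))),
         ("final", a6 ++ ls.filter (fun l => eolP6 l && (!eolP5 l && (!eolP4 l && (!eolP3 l && (!eolP2 l && !eolP1 l))))))] := by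
  induction ls generalizing a1 a2 a3 a4 a5 a6 with
  | nil => simp
  | cons line ls ih =>
    obtain h1 | h1 := Bool.eq_false_or_eq_true (eolP1 line) <;>
    obtain h2 | h2 := Bool.eq_false_or_eq_true (eolP2 line) <;>
    obtain h3 | h3 := Bool.eq_false_or_eq_true (eolP3 line) <;>
    obtain h4 | h4 := Bool.eq_false_or_eq_true (eolP4 line) <;>
    obtain h5 | h5 := Bool.eq_false_or_eq_true (eolP5 line) <;>
    obtain h6 | h6 := Bool.eq_false_or_eq_true (eolP6 line) <;>
    · rw [List.foldl_cons]
      simp only [eolStepA, show (PySem.Str.isIn "built Dictionary<" line || PySem.Str.isIn "discarding" line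
          || PySem.Str.isIn "keeping" line || PySem.Str.isIn "resulting dictionary" line) = eolP1 line from rfl,
        show (PySem.Str.isIn "using symmetric" line || PySem.Str.isIn "running online LDA training" line
          || PySem.Str.isIn "training LDA model" line) = eolP2 line from rfl,
        show PySem.Str.startswith line "PROGRESS:" = eolP3 line from rfl,
        show PySem.Str.isIn "documents converged" line = eolP4 line from rfl,
        show PySem.Str.isIn "perplexity estimate" line = eolP5 line from rfl,
        show PySem.Str.isIn "LdaMulticore lifecycle event" line = eolP6 line from rfl,
        h1, h2, h3, h4, h5, h6, if_true, if_false, Bool.false_eq_true]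
      simp [PySem.Dict.modify, PySem.Dict.get?, PySem.Dict.getD, PySem.Dict.insert, PySem.Dict.contains, ih, h1, h2, h3, h4, h5, h6]

-- ===== VERDICT (by name: the statement is the Claim_ definition above) =====
theorem extract_observational_lines_spec : Claim_equal_extract_observational_lines := by
  intro full_log _
  show _ = _
  rw [extract_observational_lines, extract_observational_lines_alt]
  rw [show PySem.Dict.ofList [("token_filtering", ([] : List String)), ("config", []), ("progress", []),
        ("convergence", []), ("perplexity", []), ("final", [])]
      = PySem.Dict.mk [("token_filtering", []), ("config", []), ("progress", []),
        ("convergence", []), ("perplexity", []), ("final", [])] from by decide]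
  rw [eolA_closed]
  simp only [eolRules, List.foldl_cons, List.foldl_nil]
  simp only [PySem.Dict.insert, PySem.Dict.contains, PySem.Dict.empty, List.filter_filter,
    List.any_nil, Bool.false_eq_true, if_false]
  rfl
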